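-- pv_equiv track=rewrite | github.com/ekzm8523/CodingTestPractice | python/kakao_recruit_internship_2021/81302.py | keep_distance_check
-- ===== SOURCE A (Python) =====
-- from collections import deque
--
-- def keep_distance_check(pos, place):
--     move = ((-1, 0), (0, 1), (1, 0), (0, -1))
--     q = deque(((pos[0], pos[1], 0),))
--
--     visit = set()
--     while q:
--         row, col, dis = q.popleft()
--         visit.add((row, col))
--         if dis == 2:
--             continue
--         for dx, dy in move:
--             nx, ny = dx + row, dy + col
--             if 0 <= nx < 5 and 0 <= ny < 5 and (nx, ny) not in visit:
--                 if place[nx][ny] == 'O':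
--                     q.append((nx, ny, dis + 1))
--                 elif place[nx][ny] == 'P':
--                     return False
--
--     return True
-- ===== SOURCE B (Python) =====
-- def keep_distance_check(pos, place):
--     # Direct two-level neighbor scan instead of a BFS: distance-1 cells are the
--     # four orthogonal neighbors of pos; distance-2 'P's are reachable only through
--     # an 'O' distance-1 cell, and the start cell itself is never counted.
--     r, c = pos[0], pos[1]
--
--     def neighbors(x, y):
--         return ((x - 1, y), (x, y + 1), (x + 1, y), (x, y - 1))
--
--     def in_grid(x, y):
--         return 0 <= x < 5 and 0 <= y < 5
--
--     def p_near(x, y):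
--         return any(in_grid(mx, my) and (mx, my) != (r, c) and place[mx][my] == 'P'
--                    for mx, my in neighbors(x, y))
--
--     return not any(in_grid(nx, ny) and (place[nx][ny] == 'P'
--                                         or (place[nx][ny] == 'O' and p_near(nx, ny)))
--                    for nx, ny in neighbors(r, c))
-- ===== Notes on version B (the rewrite author's own statement) =====
-- stated objective: simpler
-- what changed: Replaces the deque-based BFS with visited-set bookkeeping by a direct two-level scan: check the four orthogonal neighbors of pos, and through each 'O' neighbor check its four neighbors (skipping the start cell), with no queue and no visited set.
-- outside the precondition, e.g. on keep_distance_check((1, 1), ['XXXOOP', 'OPPXPX', 'X']): A returns False, B returns False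
import Mathlib
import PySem

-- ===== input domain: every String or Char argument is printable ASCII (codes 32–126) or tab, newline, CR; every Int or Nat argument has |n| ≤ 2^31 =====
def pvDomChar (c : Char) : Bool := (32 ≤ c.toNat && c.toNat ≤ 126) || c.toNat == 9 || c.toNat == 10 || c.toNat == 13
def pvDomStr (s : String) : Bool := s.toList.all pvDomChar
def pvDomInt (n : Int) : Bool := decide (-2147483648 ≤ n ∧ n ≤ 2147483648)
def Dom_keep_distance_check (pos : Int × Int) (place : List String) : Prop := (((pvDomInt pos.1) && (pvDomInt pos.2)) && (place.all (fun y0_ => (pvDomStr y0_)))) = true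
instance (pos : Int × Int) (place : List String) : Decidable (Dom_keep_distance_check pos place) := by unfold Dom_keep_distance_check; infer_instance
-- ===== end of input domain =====

-- B replaces A's deque-based BFS by a direct two-level scan of the four orthogonal
-- neighbors (and, through 'O' cells, their neighbors, skipping the start cell):
-- simpler, no queue and no visited set.

-- ===== PORT A =====

-- place[p.1][p.2] as an Option (none = IndexError); shared cell accessor
def pvCell (place : List String) (p : Int × Int) : Option Char :=
  match PySem.List.pyGet? place p.1 with
  | some s => PySem.Str.pyGet? s p.2
  | none => none

def pvMove : List (Int × Int) := [(-1, 0), (0, 1), (1, 0), (0, -1)]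

-- body of A's inner 'for dx, dy in move' loop; none = Python's 'return False'
def pvStepA (place : List String) (visit : PySem.Set (Int × Int)) (row col dis : Int)
    (acc : Option (List (Int × Int × Int))) (d : Int × Int) : Option (List (Int × Int × Int)) :=
  match acc with
  | none => none
  | some items =>
    let nx := d.1 + row
    let ny := d.2 + col
    if (0 ≤ nx ∧ nx < 5 ∧ 0 ≤ ny ∧ ny < 5) ∧ (nx, ny) ∉ visit then
      if pvCell place (nx, ny) = some 'O' then some (items ++ [(nx, ny, dis + 1)])
      else if pvCell place (nx, ny) = some 'P' then none
      else some items
    else some items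

def pvScanA (place : List String) (visit : PySem.Set (Int × Int)) (row col dis : Int) :
    Option (List (Int × Int × Int)) :=
  pvMove.foldl (pvStepA place visit row col dis) (some [])

-- A's while loop over the deque; fuel-bounded for totality (the Python enqueues at
-- most 1 + 4 + 16 = 21 items, so fuel 25 is never exhausted on any input)
def pvLoopA (place : List String) : Nat → List (Int × Int × Int) → PySem.Set (Int × Int) → Bool
  | 0, _, _ => true
  | _ + 1, [], _ => true
  | fuel + 1, (row, col, dis) :: rest, visit =>
    let visit' := PySem.Set.add visit (row, col)
    if dis = 2 then pvLoopA place fuel rest visit'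
    else
      match pvScanA place visit' row col dis with
      | none => false
      | some items => pvLoopA place fuel (rest ++ items) visit'

def keep_distance_check (pos : Int × Int) (place : List String) : Bool :=
  pvLoopA place 25 [(pos.1, pos.2, 0)] PySem.Set.empty

-- ===== PORT B =====

def pvNbrs (x y : Int) : List (Int × Int) := [(x - 1, y), (x, y + 1), (x + 1, y), (x, y - 1)]

def pvInGrid (x y : Int) : Bool := decide (0 ≤ x ∧ x < 5 ∧ 0 ≤ y ∧ y < 5)

-- Source B's p_near(x, y): some neighbor of (x,y) inside the grid, other than the start
-- cell (r,c), holds 'P'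
def pvPNear (place : List String) (r c x y : Int) : Bool :=
  (pvNbrs x y).any (fun m =>
    pvInGrid m.1 m.2 && decide (m ≠ (r, c)) && decide (pvCell place m = some 'P'))

def keep_distance_check_alt (pos : Int × Int) (place : List String) : Bool :=
  !((pvNbrs pos.1 pos.2).any (fun n =>
      pvInGrid n.1 n.2 && (decide (pvCell place n = some 'P') ||
        (decide (pvCell place n = some 'O') && pvPNear place pos.1 pos.2 n.1 n.2))))

-- ===== PRECONDITION & SPEC =====

-- Pre_ excludes inputs where some scanned in-grid cell is missing from place
-- (the Python A raises IndexError there) — including a few inputs on which A still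
-- returns False early, before its scan reaches the missing cell.
def Pre_keep_distance_check (pos : Int × Int) (place : List String) : Prop :=
  ∀ n ∈ pvNbrs pos.1 pos.2, pvInGrid n.1 n.2 = true →
    (pvCell place n).isSome ∧
    (pvCell place n = some 'O' →
      ∀ m ∈ pvNbrs n.1 n.2, pvInGrid m.1 m.2 = true → m ≠ pos → (pvCell place m).isSome)

instance (pos : Int × Int) (place : List String) : Decidable (Pre_keep_distance_check pos place) := by
  unfold Pre_keep_distance_check; infer_instance

def pvWitness_keep_distance_check : (Int × Int) × List String :=
  ((2, 2), ["OOOOO", "OOOOO", "OOOOO", "OOOOO", "OOOOO"])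

def Spec_keep_distance_check (pos : Int × Int) (place : List String) (out : Bool) : Prop := out = keep_distance_check_alt pos place
instance (pos : Int × Int) (place : List String) (out : Bool) : Decidable (Spec_keep_distance_check pos place out) := by unfold Spec_keep_distance_check; infer_instance

-- ===== CLAIM (what is proved, stated in full; the proofs are below) =====
def Claim_equal_keep_distance_check : Prop := ∀ (pos : Int × Int) (place : List String), Dom_keep_distance_check pos place → Pre_keep_distance_check pos place → Spec_keep_distance_check pos place (keep_distance_check pos place)


-- ===== LEMMAS AND PROOFS =====

-- ---- generic facts about A's inner for-loop fold ----

theorem pvFoldA_none (place : List String) (visit : PySem.Set (Int × Int)) (row col dis : Int)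
    (l : List (Int × Int)) :
    l.foldl (pvStepA place visit row col dis) none = none := by
  induction l with
  | nil => rfl
  | cons d l ih => simpa [pvStepA] using ih

theorem pvFoldA_eq_none_iff (place : List String) (visit : PySem.Set (Int × Int)) (row col dis : Int)
    (l : List (Int × Int)) (acc : List (Int × Int × Int)) :
    l.foldl (pvStepA place visit row col dis) (some acc) = none ↔
      ∃ d ∈ l, ((0 ≤ d.1 + row ∧ d.1 + row < 5 ∧ 0 ≤ d.2 + col ∧ d.2 + col < 5) ∧
                 (d.1 + row, d.2 + col) ∉ visit) ∧
               pvCell place (d.1 + row, d.2 + col) = some 'P' := by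
  induction l generalizing acc with
  | nil => simp
  | cons d l ih =>
    simp only [List.foldl_cons, List.mem_cons]
    by_cases hg : (0 ≤ d.1 + row ∧ d.1 + row < 5 ∧ 0 ≤ d.2 + col ∧ d.2 + col < 5) ∧
        (d.1 + row, d.2 + col) ∉ visit
    · by_cases hO : pvCell place (d.1 + row, d.2 + col) = some 'O'
      · have hstep : pvStepA place visit row col dis (some acc) d
            = some (acc ++ [(d.1 + row, d.2 + col, dis + 1)]) := by
          simp [pvStepA, hg, hO]
        rw [hstep, ih]
        constructor
        · rintro ⟨e, he, h1, h2⟩; exact ⟨e, Or.inr he, h1, h2⟩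
        · rintro ⟨e, he, h1, h2⟩
          rcases he with rfl | he
          · simp [hO] at h2
          · exact ⟨e, he, h1, h2⟩
      · by_cases hPc : pvCell place (d.1 + row, d.2 + col) = some 'P'
        · have hstep : pvStepA place visit row col dis (some acc) d = none := by
            simp [pvStepA, hg, hPc]
          rw [hstep, pvFoldA_none]
          simp only [true_iff]
          exact ⟨d, Or.inl rfl, hg, hPc⟩
        · have hstep : pvStepA place visit row col dis (some acc) d = some acc := by
            simp [pvStepA, hg, hO, hPc]
          rw [hstep, ih]
          constructor
          · rintro ⟨e, he, h1, h2⟩; exact ⟨e, Or.inr he, h1, h2⟩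
          · rintro ⟨e, he, h1, h2⟩
            rcases he with rfl | he
            · exact absurd h2 hPc
            · exact ⟨e, he, h1, h2⟩
    · have hstep : pvStepA place visit row col dis (some acc) d = some acc := by
        simp only [pvStepA]; rw [if_neg hg]
      rw [hstep, ih]
      constructor
      · rintro ⟨e, he, h1, h2⟩; exact ⟨e, Or.inr he, h1, h2⟩
      · rintro ⟨e, he, h1, h2⟩
        rcases he with rfl | he
        · exact absurd h1 hg
        · exact ⟨e, he, h1, h2⟩

theorem pvFoldA_eq_some (place : List String) (visit : PySem.Set (Int × Int)) (row col dis : Int)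
    (l : List (Int × Int)) (acc : List (Int × Int × Int))
    (h : ∀ d ∈ l, ¬ (((0 ≤ d.1 + row ∧ d.1 + row < 5 ∧ 0 ≤ d.2 + col ∧ d.2 + col < 5) ∧
                      (d.1 + row, d.2 + col) ∉ visit) ∧
                     pvCell place (d.1 + row, d.2 + col) = some 'P')) :
    l.foldl (pvStepA place visit row col dis) (some acc) =
      some (acc ++ (l.filter (fun d =>
          decide (((0 ≤ d.1 + row ∧ d.1 + row < 5 ∧ 0 ≤ d.2 + col ∧ d.2 + col < 5) ∧
                   (d.1 + row, d.2 + col) ∉ visit) ∧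
                  pvCell place (d.1 + row, d.2 + col) = some 'O'))).map
        (fun d => (d.1 + row, d.2 + col, dis + 1))) := by
  induction l generalizing acc with
  | nil => simp
  | cons d l ih =>
    simp only [List.foldl_cons]
    by_cases hg : (0 ≤ d.1 + row ∧ d.1 + row < 5 ∧ 0 ≤ d.2 + col ∧ d.2 + col < 5) ∧
        (d.1 + row, d.2 + col) ∉ visit
    · by_cases hO : pvCell place (d.1 + row, d.2 + col) = some 'O'
      · have hstep : pvStepA place visit row col dis (some acc) d
            = some (acc ++ [(d.1 + row, d.2 + col, dis + 1)]) := by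
          simp [pvStepA, hg, hO]
        rw [hstep, ih _ (fun e he => h e (List.mem_cons_of_mem _ he))]
        simp [hg, hO]
      · have hPc : ¬ pvCell place (d.1 + row, d.2 + col) = some 'P' := fun hPc =>
          h d (List.mem_cons_self ..) ⟨hg, hPc⟩
        have hstep : pvStepA place visit row col dis (some acc) d = some acc := by
          simp [pvStepA, hg, hO, hPc]
        rw [hstep, ih _ (fun e he => h e (List.mem_cons_of_mem _ he))]
        simp [hg, hO]
    · have hstep : pvStepA place visit row col dis (some acc) d = some acc := by
        simp only [pvStepA]; rw [if_neg hg]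
      rw [hstep, ih _ (fun e he => h e (List.mem_cons_of_mem _ he))]
      simp [hg]

-- ---- geometry of the four neighbor offsets ----

theorem pvNbrs_eq_map (x y : Int) :
    pvNbrs x y = pvMove.map (fun d => (d.1 + x, d.2 + y)) := by
  simp only [pvNbrs, pvMove, List.map_cons, List.map_nil]
  norm_num [Prod.ext_iff]
  omega

theorem pvNbr_ne (x y : Int) : ∀ d ∈ pvMove, (d.1 + x, d.2 + y) ≠ (x, y) := by
  intro d hd
  fin_cases hd <;> simp [Prod.ext_iff]

-- ---- A's while loop: flushing a distance-2 queue, then the distance-1 phase ----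

theorem pvLoopA_flush (place : List String) :
    ∀ (fuel : Nat) (q : List (Int × Int × Int)) (visit : PySem.Set (Int × Int)),
      (∀ it ∈ q, it.2.2 = (2 : Int)) → pvLoopA place fuel q visit = true := by
  intro fuel
  induction fuel with
  | zero => intro q visit _; rfl
  | succ f ih =>
    intro q visit hq
    match q with
    | [] => rfl
    | (row, col, dis) :: rest =>
      have hd : dis = 2 := hq (row, col, dis) (List.mem_cons_self ..)
      rw [pvLoopA, if_pos hd]
      exact ih rest _ (fun it hit => hq it (List.mem_cons_of_mem _ hit))

theorem pvLoopA_phase1 (place : List String) (r c : Int) :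
    ∀ (q1 : List (Int × Int)) (fuel : Nat) (q2 : List (Int × Int × Int))
      (visit : PySem.Set (Int × Int)),
      (∀ p ∈ q1, pvCell place p = some 'O') →
      (r, c) ∈ visit →
      (∀ v ∈ visit, v = (r, c) ∨ pvCell place v = some 'O') →
      (∀ it ∈ q2, it.2.2 = (2 : Int)) →
      5 * q1.length ≤ fuel →
      pvLoopA place fuel (q1.map (fun p => (p.1, p.2, (1 : Int))) ++ q2) visit
        = q1.all (fun p => !pvPNear place r c p.1 p.2) := by
  intro q1
  induction q1 with
  | nil =>
    intro fuel q2 visit _ _ _ hq2 _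
    simpa using pvLoopA_flush place fuel q2 visit hq2
  | cons p rest ih =>
    intro fuel q2 visit hO hrc hvisit hq2 hfuel
    match fuel with
    | 0 => simp at hfuel
    | f + 1 =>
      have hOp : pvCell place p = some 'O' := hO p (List.mem_cons_self ..)
      simp only [List.map_cons, List.cons_append]
      rw [pvLoopA, if_neg (by norm_num)]
      have hrc' : (r, c) ∈ PySem.Set.add visit (p.1, p.2) := by
        simp [PySem.Set.mem_add, hrc]
      have hvisit' : ∀ v ∈ PySem.Set.add visit (p.1, p.2),
          v = (r, c) ∨ pvCell place v = some 'O' := by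
        intro v hv
        rcases (PySem.Set.mem_add ..).mp hv with hv | rfl
        · exact hvisit v hv
        · exact Or.inr hOp
      by_cases hpn : pvPNear place r c p.1 p.2 = true
      · -- a 'P' is adjacent: the scan returns none, A returns false
        have : pvScanA place (PySem.Set.add visit (p.1, p.2)) p.1 p.2 1 = none := by
          rw [pvScanA, pvFoldA_eq_none_iff]
          simp only [pvPNear, List.any_eq_true, pvNbrs_eq_map, List.mem_map] at hpn
          obtain ⟨m, ⟨d, hd, rfl⟩, hm⟩ := hpn
          simp only [Bool.and_eq_true, decide_eq_true_eq, pvInGrid] at hm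
          obtain ⟨⟨hgrid, hne⟩, hP⟩ := hm
          refine ⟨d, hd, ⟨⟨hgrid.1, hgrid.2.1, hgrid.2.2.1, hgrid.2.2.2⟩, ?_⟩, hP⟩
          intro hmem
          rcases (PySem.Set.mem_add ..).mp hmem with hmem | heq
          · rcases hvisit _ hmem with h | h
            · exact hne h
            · rw [hP] at h; simp at h
          · rw [heq, hOp] at hP; simp at hP
        rw [this]
        simp [hpn]
      · -- no adjacent 'P': the scan enqueues the 'O' neighbors at distance 2
        have hnoP : ∀ d ∈ pvMove,
            ¬ (((0 ≤ d.1 + p.1 ∧ d.1 + p.1 < 5 ∧ 0 ≤ d.2 + p.2 ∧ d.2 + p.2 < 5) ∧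
                (d.1 + p.1, d.2 + p.2) ∉ PySem.Set.add visit (p.1, p.2)) ∧
               pvCell place (d.1 + p.1, d.2 + p.2) = some 'P') := by
          rintro d hd ⟨⟨hgrid, hnv⟩, hP⟩
          have hne : (d.1 + p.1, d.2 + p.2) ≠ (r, c) := by
            intro heq
            exact hnv ((PySem.Set.mem_add ..).mpr (Or.inl (heq ▸ hrc)))
          apply hpn
          simp only [pvPNear, List.any_eq_true, pvNbrs_eq_map, List.mem_map]
          refine ⟨(d.1 + p.1, d.2 + p.2), ⟨d, hd, rfl⟩, ?_⟩
          simp [pvInGrid, hgrid, hne, hP]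
        rw [pvScanA, pvFoldA_eq_some place _ p.1 p.2 1 pvMove [] hnoP]
        simp only [List.nil_append]
        rw [List.append_assoc]
        rw [ih f _ (PySem.Set.add visit (p.1, p.2))
              (fun e he => hO e (List.mem_cons_of_mem _ he)) hrc' hvisit'
              ?_ (by simp at hfuel ⊢; omega)]
        · simp [hpn]
        · intro it hit
          rcases List.mem_append.mp hit with hit | hit
          · exact hq2 it hit
          · simp only [List.mem_map] at hit
            obtain ⟨d, _, rfl⟩ := hit
            norm_num

-- ---- bridging the Bool shapes of B ----

theorem pvAll_filter_not {α : Type} (l : List α) (g p : α → Bool) :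
    (l.filter g).all (fun a => !p a) = !(l.any (fun a => g a && p a)) := by
  induction l with
  | nil => rfl
  | cons a l ih => cases hg : g a <;> simp [hg, ih]

theorem pvAny_congr {α : Type} : ∀ (l : List α) (p q : α → Bool),
    (∀ a ∈ l, p a = q a) → l.any p = l.any q
  | [], _, _, _ => rfl
  | a :: l, p, q, h => by
    simp only [List.any_cons, h a (List.mem_cons_self ..),
      pvAny_congr l p q (fun b hb => h b (List.mem_cons_of_mem _ hb))]

theorem keep_distance_check_spec : Claim_equal_keep_distance_check := by
  rintro ⟨r, c⟩ place _hdom _hpre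
  unfold Spec_keep_distance_check
  show pvLoopA place 25 [(r, c, 0)] PySem.Set.empty = keep_distance_check_alt (r, c) place
  rw [show (25 : Nat) = 24 + 1 from rfl, pvLoopA, if_neg (by norm_num)]
  have hadd : PySem.Set.add (PySem.Set.empty : PySem.Set (Int × Int)) (r, c) = [(r, c)] := rfl
  rw [hadd]
  by_cases hP : ∃ d ∈ pvMove, (0 ≤ d.1 + r ∧ d.1 + r < 5 ∧ 0 ≤ d.2 + c ∧ d.2 + c < 5) ∧
      pvCell place (d.1 + r, d.2 + c) = some 'P'
  · -- a 'P' directly adjacent to pos: both sides are false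
    have hscan : pvScanA place [(r, c)] r c 0 = none := by
      rw [pvScanA, pvFoldA_eq_none_iff]
      obtain ⟨d, hd, hg, hPc⟩ := hP
      exact ⟨d, hd, ⟨hg, by simpa using pvNbr_ne r c d hd⟩, hPc⟩
    rw [hscan]
    have hany : ((pvNbrs r c).any (fun n =>
        pvInGrid n.1 n.2 && (decide (pvCell place n = some 'P') ||
          (decide (pvCell place n = some 'O') &&
            pvPNear place r c n.1 n.2)))) = true := by
      rw [pvNbrs_eq_map]
      simp only [List.any_map, List.any_eq_true, Function.comp_apply]
      obtain ⟨d, hd, hg, hPc⟩ := hP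
      exact ⟨d, hd, by simp [pvInGrid, hg, hPc]⟩
    simp [keep_distance_check_alt, hany]
  · -- no 'P' adjacent to pos: A scans the 'O' neighbors at distance 1
    have hnoP : ∀ d ∈ pvMove,
        ¬ (((0 ≤ d.1 + r ∧ d.1 + r < 5 ∧ 0 ≤ d.2 + c ∧ d.2 + c < 5) ∧
            (d.1 + r, d.2 + c) ∉ ([(r, c)] : List (Int × Int))) ∧
           pvCell place (d.1 + r, d.2 + c) = some 'P') := by
      rintro d hd ⟨⟨hg, _⟩, hPc⟩
      exact hP ⟨d, hd, hg, hPc⟩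
    rw [pvScanA, pvFoldA_eq_some place [(r, c)] r c 0 pvMove [] hnoP]
    simp only [List.nil_append]
    -- the queue after the first pop is exactly phase 1 on the 'O' neighbors
    set g : Int × Int → Bool := fun d =>
      decide (((0 ≤ d.1 + r ∧ d.1 + r < 5 ∧ 0 ≤ d.2 + c ∧ d.2 + c < 5) ∧
               (d.1 + r, d.2 + c) ∉ ([(r, c)] : List (Int × Int))) ∧
              pvCell place (d.1 + r, d.2 + c) = some 'O') with hgdef
    have hitems : (pvMove.filter g).map (fun d => (d.1 + r, d.2 + c, (0 : Int) + 1))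
        = ((pvMove.filter g).map (fun d => (d.1 + r, d.2 + c))).map
            (fun p => (p.1, p.2, (1 : Int))) := by
      rw [List.map_map]; norm_num
    rw [hitems, ← List.append_nil (((pvMove.filter g).map (fun d => (d.1 + r, d.2 + c))).map (fun p => (p.1, p.2, (1 : Int))))]
    rw [pvLoopA_phase1 place r c ((pvMove.filter g).map (fun d => (d.1 + r, d.2 + c))) 24 [] [(r, c)]
          ?_ (by simp) ?_ (by simp) ?_]
    · -- the two Bool shapes agree
      rw [List.all_map]
      have hB : keep_distance_check_alt (r, c) place
          = !(pvMove.any (fun d => g d && pvPNear place r c (d.1 + r) (d.2 + c))) := by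
        simp only [keep_distance_check_alt, pvNbrs_eq_map, List.any_map]
        congr 1
        apply pvAny_congr
        intro d hd
        simp only [Function.comp_apply, hgdef]
        by_cases hgr : (0 ≤ d.1 + r ∧ d.1 + r < 5 ∧ 0 ≤ d.2 + c ∧ d.2 + c < 5)
        · have hPc : ¬ pvCell place (d.1 + r, d.2 + c) = some 'P' :=
            fun hPc => hP ⟨d, hd, hgr, hPc⟩
          simp [pvInGrid, hgr, hPc, pvNbr_ne r c d hd]
        · simp [pvInGrid, hgr]
      rw [hB, ← pvAll_filter_not pvMove g (fun d => pvPNear place r c (d.1 + r) (d.2 + c))]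
      rfl
    · -- every queued cell holds 'O'
      intro p hp
      simp only [List.mem_map, List.mem_filter, hgdef, decide_eq_true_eq] at hp
      obtain ⟨d, ⟨_, _, hO⟩, rfl⟩ := hp
      exact hO
    · -- the visited set holds only pos
      intro v hv
      simp only [List.mem_singleton] at hv
      exact Or.inl hv
    · -- fuel bound
      have := List.length_filter_le g pvMove
      simp only [List.length_map, pvMove, List.length_cons, List.length_nil] at this ⊢
      omega

-- ===== VERDICT (by name: the statement is the Claim_ definition above) =====
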